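-- pv_equiv track=rewrite | github.com/Mateuswb/Monitor-precos | app/search.py | titulo_valido
-- ===== SOURCE A (Python) =====
-- def titulo_valido(titulo, busca):
--     titulo = titulo.lower()
--     palavras_busca = busca.lower().split()
--
--     palavras_obrigatorias = []
--     palavras_normais = []
--
--     for palavra in palavras_busca:
--         if any(c.isdigit() for c in palavra):
--             palavras_obrigatorias.append(palavra)
--         elif len(palavra) <= 3:
--             palavras_obrigatorias.append(palavra)
--         else:
--             palavras_normais.append(palavra)
--
--     for palavra in palavras_obrigatorias:
--         if palavra not in titulo:
--             return False
--
--     correspondencias = 0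
--     for palavra in palavras_normais:
--         if palavra in titulo:
--             correspondencias += 1
--
--     if palavras_normais:
--         return correspondencias >= len(palavras_normais) // 2
--
--     return True
-- ===== SOURCE B (Python) =====
-- def titulo_valido(titulo, busca):
--     t = titulo.lower()
--
--     def stats(words):
--         # recursion on the tail, combining back-to-front: (all obligatory present, #normals, #normal hits)
--         if not words:
--             return (True, 0, 0)
--         ok, n, h = stats(words[1:])
--         w = words[0]
--         if any(map(str.isdigit, w)) or len(w) <= 3:
--             return (ok and w in t, n, h)
--         return (ok, n + 1, h + (w in t))
--
--     ok, n, h = stats(busca.lower().split())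
--     return ok and (n == 0 or h >= n // 2)
-- ===== Notes on version B (the rewrite author's own statement) =====
-- stated objective: alternative
-- what changed: A imperatively partitions the words into two lists and then runs two more loops with an early return; B is a pure structural recursion over the word list that combines results back-to-front into an (all-obligatory-present, normal-count, normal-hits) triple and decides everything in one final boolean formula, with no intermediate lists, no mutation and no early return.
import Mathlib
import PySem

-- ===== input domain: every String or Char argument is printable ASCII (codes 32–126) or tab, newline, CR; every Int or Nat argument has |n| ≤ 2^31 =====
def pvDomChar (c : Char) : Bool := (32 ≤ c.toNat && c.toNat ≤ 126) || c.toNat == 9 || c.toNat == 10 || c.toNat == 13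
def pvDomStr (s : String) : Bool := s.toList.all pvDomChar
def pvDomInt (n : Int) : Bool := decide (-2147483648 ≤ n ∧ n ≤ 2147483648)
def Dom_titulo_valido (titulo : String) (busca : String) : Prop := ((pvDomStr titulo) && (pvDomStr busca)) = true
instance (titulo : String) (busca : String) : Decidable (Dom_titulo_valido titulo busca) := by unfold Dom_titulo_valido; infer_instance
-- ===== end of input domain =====

-- B replaces A's imperative list-partitioning and three loops with one pure structural
-- recursion combining an (ok, normals, hits) triple back-to-front — objective: alternative.

-- ===== PORT A =====
def titulo_valido (titulo : String) (busca : String) : Bool :=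
  let t := PySem.Str.lower titulo
  let ws := PySem.Str.split₀ (PySem.Str.lower busca)
  let p := ws.foldl (fun (p : List String × List String) w =>
      if w.toList.any PySem.Chars.isdigit then (p.1 ++ [w], p.2)
      else if PySem.Str.len w ≤ 3 then (p.1 ++ [w], p.2)
      else (p.1, p.2 ++ [w])) ([], [])
  if p.1.any (fun w => !PySem.Str.isIn w t) then false
  else
    let c := p.2.foldl (fun acc w => if PySem.Str.isIn w t then acc + 1 else acc) (0 : Int)
    if p.2 ≠ [] then decide (c ≥ PySem.Int.floordiv (PySem.List.len p.2) 2) else true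

-- ===== PORT B =====
-- Source B's recursion `stats`: recursion on the tail, combined back-to-front
def tvStats (t : String) (ws : List String) : Bool × Nat × Nat :=
  match ws with
  | [] => (true, 0, 0)
  | w :: rest =>
    let s := tvStats t rest
    if w.toList.any PySem.Chars.isdigit || decide (PySem.Str.len w ≤ 3) then
      (s.1 && PySem.Str.isIn w t, s.2.1, s.2.2)
    else
      (s.1, s.2.1 + 1, s.2.2 + (if PySem.Str.isIn w t then 1 else 0))

def titulo_valido_alt (titulo : String) (busca : String) : Bool :=
  let t := PySem.Str.lower titulo
  let s := tvStats t (PySem.Str.split₀ (PySem.Str.lower busca))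
  s.1 && (s.2.1 == 0 || decide ((s.2.2 : Int) ≥ PySem.Int.floordiv (s.2.1 : Int) 2))

-- ===== PRECONDITION & SPEC =====
def Spec_titulo_valido (titulo : String) (busca : String) (out : Bool) : Prop := out = titulo_valido_alt titulo busca
instance (titulo : String) (busca : String) (out : Bool) : Decidable (Spec_titulo_valido titulo busca out) := by unfold Spec_titulo_valido; infer_instance

-- ===== CLAIM (what is proved, stated in full; the proofs are below) =====
def Claim_equal_titulo_valido : Prop := ∀ (titulo : String) (busca : String), Dom_titulo_valido titulo busca → Spec_titulo_valido titulo busca (titulo_valido titulo busca)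

-- ===== LEMMAS AND PROOFS =====

def pvObrig (w : String) : Bool :=
  w.toList.any PySem.Chars.isdigit || decide (PySem.Str.len w ≤ 3)

lemma pv_fold_part (ws : List String) (o n : List String) :
    ws.foldl (fun (p : List String × List String) w =>
      if w.toList.any PySem.Chars.isdigit then (p.1 ++ [w], p.2)
      else if PySem.Str.len w ≤ 3 then (p.1 ++ [w], p.2)
      else (p.1, p.2 ++ [w])) (o, n)
    = (o ++ ws.filter pvObrig, n ++ ws.filter (fun w => !pvObrig w)) := by
  induction ws generalizing o n with
  | nil => simp
  | cons w rest ih =>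
    simp only [List.foldl_cons]
    by_cases h1 : w.toList.any PySem.Chars.isdigit = true
    · have hb : pvObrig w = true := by simp [pvObrig, h1]
      rw [if_pos h1, ih, List.filter_cons, List.filter_cons]
      simp [hb]
    · by_cases h2 : PySem.Str.len w ≤ 3
      · have hb : pvObrig w = true := by
          unfold pvObrig; rw [decide_eq_true h2, Bool.or_true]
        rw [if_neg h1, if_pos h2, ih, List.filter_cons, List.filter_cons]
        simp [hb]
      · have hb : pvObrig w = false := by
          unfold pvObrig
          rw [decide_eq_false h2, Bool.or_false, Bool.eq_false_iff]
          exact h1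
        rw [if_neg h1, if_neg h2, ih, List.filter_cons, List.filter_cons]
        simp [hb]

lemma pv_fold_count (t : String) (n : List String) (c : Int) :
    n.foldl (fun acc w => if PySem.Str.isIn w t then acc + 1 else acc) c
    = c + (n.countP (fun w => PySem.Str.isIn w t)) := by
  induction n generalizing c with
  | nil => simp
  | cons w rest ih =>
    simp only [List.foldl_cons]
    rw [ih, List.countP_cons]
    by_cases h : PySem.Str.isIn w t = true
    · rw [if_pos h, if_pos h]; push_cast; ring
    · rw [if_neg h, if_neg h]; push_cast; ring

lemma pv_stats_spec (t : String) (ws : List String) :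
    tvStats t ws = ((ws.filter pvObrig).all (fun w => PySem.Str.isIn w t),
                    (ws.filter (fun w => !pvObrig w)).length,
                    (ws.filter (fun w => !pvObrig w)).countP (fun w => PySem.Str.isIn w t)) := by
  induction ws with
  | nil => simp [tvStats]
  | cons w rest ih =>
    simp only [tvStats, ih, List.filter_cons]
    by_cases hb : pvObrig w = true
    · have hc : (w.toList.any PySem.Chars.isdigit || decide (PySem.Str.len w ≤ 3)) = true := hb
      simp only [hc, hb, Bool.not_true, Bool.false_eq_true, if_true, if_false, List.all_cons]
      rw [Bool.and_comm]
    · rw [Bool.not_eq_true] at hb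
      have hc : (w.toList.any PySem.Chars.isdigit || decide (PySem.Str.len w ≤ 3)) = false := hb
      simp only [hc, hb, Bool.not_false, Bool.false_eq_true, if_true, if_false,
        List.length_cons, List.countP_cons]

-- ===== VERDICT (by name: the statement is the Claim_ definition above) =====
theorem titulo_valido_spec : Claim_equal_titulo_valido := by
  intro titulo busca _
  show titulo_valido titulo busca = titulo_valido_alt titulo busca
  unfold titulo_valido titulo_valido_alt
  simp only [pv_fold_part, List.nil_append, pv_stats_spec, pv_fold_count]
  set t := PySem.Str.lower titulo
  set ws := PySem.Str.split₀ (PySem.Str.lower busca)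
  set O := ws.filter pvObrig with hO
  set N := ws.filter (fun w => !pvObrig w) with hN
  by_cases hok : O.all (fun w => PySem.Str.isIn w t) = true
  · have hany : O.any (fun w => !PySem.Str.isIn w t) = false := by
      simpa [List.all_eq_not_any_not] using hok
    simp only [hany, Bool.false_eq_true, if_false, hok, Bool.true_and]
    by_cases hNe : N = []
    · simp [hNe]
    · have hlen : 0 < N.length := List.length_pos_iff.mpr hNe
      rw [if_pos hNe]
      have : (N.length == 0) = false := by
        simp only [beq_eq_false_iff_ne]; omega
      rw [this, Bool.false_or, decide_eq_decide]
      simp [PySem.List.len_eq]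
  · have hany : O.any (fun w => !PySem.Str.isIn w t) = true := by
      cases h : O.any (fun w => !PySem.Str.isIn w t)
      · exact absurd (by rw [List.all_eq_not_any_not, h]; rfl) hok
      · rfl
    have hall : O.all (fun w => PySem.Str.isIn w t) = false := Bool.eq_false_iff.mpr hok
    simp only [hany, if_true, hall, Bool.false_and]
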